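-- pv_equiv track=rewrite | github.com/wook101/algorithm | 프로그래머스/약수의 개수와 덧셈.py | solution
-- ===== SOURCE A (Python) =====
-- def solution(left, right):
--     ans = 0
--     for num in range(left, right + 1):
--         tmp = 0
--         for i in range(1, num + 1):
--             if num % i == 0:
--                 tmp += 1
--         ans = ans + num if tmp % 2 == 0 else ans - num
--     return ans
-- ===== SOURCE B (Python) =====
-- def solution(left, right):
--     ans = 0
--     k = 1
--     while k * k < left:
--         k += 1
--     for num in range(left, right + 1):
--         if num == k * k:
--             ans -= num
--             k += 1
--         else:
--             ans += num
--     return ans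
-- ===== Notes on version B (the rewrite author's own statement) =====
-- stated objective: alternative
-- what changed: Replaces the per-number divisor-counting inner loop (odd divisor count = perfect square) by a single two-pointer scan that tracks the next perfect square k*k while walking the range.
import Mathlib
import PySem

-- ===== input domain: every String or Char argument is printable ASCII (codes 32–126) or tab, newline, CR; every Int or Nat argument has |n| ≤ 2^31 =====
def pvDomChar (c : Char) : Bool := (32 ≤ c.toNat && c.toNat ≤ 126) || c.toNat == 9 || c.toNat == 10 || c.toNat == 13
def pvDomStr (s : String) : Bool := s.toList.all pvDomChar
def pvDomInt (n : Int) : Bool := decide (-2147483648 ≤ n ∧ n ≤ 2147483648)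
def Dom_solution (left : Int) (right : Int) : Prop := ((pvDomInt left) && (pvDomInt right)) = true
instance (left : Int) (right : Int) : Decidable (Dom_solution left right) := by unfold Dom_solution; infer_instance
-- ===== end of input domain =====

-- B replaces A's per-number divisor-counting inner loop by a two-pointer scan that tracks the
-- next perfect square (odd divisor count ⇔ perfect square); objective: alternative algorithm.

-- ===== PORT A =====
def solution (left : Int) (right : Int) : Int :=
  (PySem.List.pyRange left (right + 1) 1).foldl
    (fun ans num =>
      let tmp : Int := (PySem.List.pyRange 1 (num + 1) 1).foldl
        (fun tmp i => if PySem.Int.mod num i = 0 then tmp + 1 else tmp) 0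
      if PySem.Int.mod tmp 2 = 0 then ans + num else ans - num)
    0

-- ===== PORT B =====
-- the initial `while k * k < left: k += 1` loop of Source B
def solutionAltFindK (left : Int) (k : Int) : Int :=
  if k * k < left then solutionAltFindK left (k + 1) else k
termination_by (left - k).toNat
decreasing_by
  have hk : k ≤ k * k := by
    by_cases h : k ≤ 0
    · exact le_trans h (mul_self_nonneg k)
    · push Not at h; nlinarith
  omega

def solution_alt (left : Int) (right : Int) : Int :=
  let k0 := solutionAltFindK left 1
  ((PySem.List.pyRange left (right + 1) 1).foldl
      (fun (s : Int × Int) num =>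
        if num = s.2 * s.2 then (s.1 - num, s.2 + 1) else (s.1 + num, s.2))
      (0, k0)).1

-- ===== PRECONDITION & SPEC =====
def Spec_solution (left : Int) (right : Int) (out : Int) : Prop := out = solution_alt left right
instance (left : Int) (right : Int) (out : Int) : Decidable (Spec_solution left right out) := by unfold Spec_solution; infer_instance

-- ===== CLAIM (what is proved, stated in full; the proofs are below) =====
def Claim_equal_solution : Prop := ∀ (left : Int) (right : Int), Dom_solution left right → Spec_solution left right (solution left right)

-- ===== LEMMAS AND PROOFS =====

-- A's loop body and B's loop body, named for the proofs (definitionally the ports' lambdas)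
def stepA : Int → Int → Int := fun ans num =>
  let tmp : Int := (PySem.List.pyRange 1 (num + 1) 1).foldl
    (fun tmp i => if PySem.Int.mod num i = 0 then tmp + 1 else tmp) 0
  if PySem.Int.mod tmp 2 = 0 then ans + num else ans - num

def stepB : Int × Int → Int → Int × Int := fun s num =>
  if num = s.2 * s.2 then (s.1 - num, s.2 + 1) else (s.1 + num, s.2)

theorem solution_eq_foldA (left right : Int) :
    solution left right = (PySem.List.pyRange left (right + 1) 1).foldl stepA 0 := rfl

theorem solution_alt_eq_foldB (left right : Int) :
    solution_alt left right =
      ((PySem.List.pyRange left (right + 1) 1).foldl stepB (0, solutionAltFindK left 1)).1 := rfl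

-- the counting fold is a countP
theorem foldl_count (p : Int → Prop) [DecidablePred p] :
    ∀ (l : List Int) (c : Int),
      l.foldl (fun t i => if p i then t + 1 else t) c = c + l.countP (fun i => decide (p i)) := by
  intro l
  induction l with
  | nil => intro c; simp
  | cons x xs ih =>
    intro c
    by_cases h : p x <;> simp [h, ih] <;> ring

-- odd number of divisors iff perfect square (involution d ↦ m / d)
theorem odd_card_divisors_iff (m : ℕ) (hm : 0 < m) : Odd (m.divisors.card) ↔ IsSquare m := by
  have hmem : ∀ d ∈ m.divisors, m / d ∈ m.divisors := by
    intro d hd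
    rw [Nat.mem_divisors] at hd ⊢
    exact ⟨Nat.div_dvd_of_dvd hd.1, hd.2⟩
  have hinv : ∀ d ∈ m.divisors, m / (m / d) = d := by
    intro d hd
    rw [Nat.mem_divisors] at hd
    exact Nat.div_div_self hd.1 hd.2
  have hfix : ∀ d ∈ m.divisors, (m / d = d ↔ d * d = m) := by
    intro d hd
    rw [Nat.mem_divisors] at hd
    constructor
    · intro h
      conv_rhs => rw [← Nat.div_mul_cancel hd.1]
      rw [h]
    · intro h
      rcases Nat.eq_zero_or_pos d with rfl | hd0
      · simp at h; exact absurd h.symm hd.2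
      · rw [← h, Nat.mul_div_cancel_left d hd0]
  constructor
  · intro hodd
    by_contra hsq
    have : ((m.divisors.card : ZMod 2)) = 0 := by
      rw [Finset.card_eq_sum_ones, Nat.cast_sum]
      refine Finset.sum_involution (fun d _ => m / d) ?_ ?_ ?_ ?_
      · intro a ha; decide
      · intro a ha _ h
        exact hsq ⟨a, ((hfix a ha).mp h).symm⟩
      · exact hmem
      · intro a ha; exact hinv a ha
    rw [ZMod.natCast_eq_zero_iff_even] at this
    exact (Nat.not_odd_iff_even.mpr this) hodd
  · rintro ⟨r, rfl⟩
    have hrr : 0 < r := by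
      rcases Nat.eq_zero_or_pos r with rfl | h
      · simp at hm
      · exact h
    have hr : r ∈ (r * r).divisors := Nat.mem_divisors.mpr ⟨Dvd.intro r rfl, by omega⟩
    have key : (((r * r).divisors.erase r).card : ZMod 2) = 0 := by
      rw [Finset.card_eq_sum_ones, Nat.cast_sum]
      refine Finset.sum_involution (fun d _ => (r * r) / d) ?_ ?_ ?_ ?_
      · intro a ha; decide
      · intro a ha _ h
        have ha' := Finset.mem_of_mem_erase ha
        exact (Finset.ne_of_mem_erase ha) (Nat.mul_self_inj.mp ((hfix a ha').mp h))
      · intro a ha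
        have ha' := Finset.mem_of_mem_erase ha
        refine Finset.mem_erase.mpr ⟨?_, hmem a ha'⟩
        intro h
        have h' : (r * r) / a = r := h
        have h2 : a = (r * r) / ((r * r) / a) := (hinv a ha').symm
        rw [h', Nat.mul_div_cancel_left r hrr] at h2
        exact (Finset.ne_of_mem_erase ha) h2
      · intro a ha; exact hinv a (Finset.mem_of_mem_erase ha)
    have hcard : (r * r).divisors.card = ((r * r).divisors.erase r).card + 1 := by
      rw [Finset.card_erase_of_mem hr]
      have : 0 < (r * r).divisors.card := Finset.card_pos.mpr ⟨r, hr⟩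
      omega
    rw [ZMod.natCast_eq_zero_iff_even] at key
    rcases key with ⟨c, hc⟩
    exact ⟨c, by omega⟩

theorem countP_range_to_finset (N : ℕ) (p : ℕ → Bool) :
    (List.range N).countP p = ((Finset.range N).filter (fun k => p k = true)).card := by
  induction N with
  | zero => simp
  | succ n ih =>
    by_cases h : p n <;>
      simp [List.range_succ, Finset.range_add_one, List.countP_append, Finset.filter_insert, h, ih,
        Finset.card_insert_of_notMem]

theorem countP_range_divisors (m : ℕ) (hm : 0 < m) :
    (List.range m).countP (fun k => decide ((k + 1) ∣ m)) = m.divisors.card := by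
  rw [countP_range_to_finset]
  refine Finset.card_nbij (fun k => k + 1) ?_ ?_ ?_
  · intro k hk
    simp only [Finset.mem_coe, Finset.mem_filter, Finset.mem_range, decide_eq_true_eq] at hk
    exact Nat.mem_divisors.mpr ⟨hk.2, by omega⟩
  · intro a _ b _ hab
    have hab' : a + 1 = b + 1 := hab
    omega
  · intro d hd
    rw [Finset.mem_coe, Nat.mem_divisors] at hd
    have hd1 : 1 ≤ d := Nat.pos_of_dvd_of_pos hd.1 hm
    have hdm : d ≤ m := Nat.le_of_dvd hm hd.1
    refine ⟨d - 1, ?_, by show d - 1 + 1 = d; omega⟩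
    simp only [Finset.mem_coe, Finset.mem_filter, Finset.mem_range, decide_eq_true_eq]
    constructor
    · omega
    · have h' : d - 1 + 1 = d := by omega
      rw [h']; exact hd.1

-- A's inner loop computes the divisor count of num (for num ≥ 1)
theorem innerFold_eq_card (num : Int) (h1 : 1 ≤ num) :
    (PySem.List.pyRange 1 (num + 1) 1).foldl
        (fun tmp i => if PySem.Int.mod num i = 0 then tmp + 1 else tmp) 0
      = (num.toNat.divisors.card : Int) := by
  rw [foldl_count (fun i => PySem.Int.mod num i = 0)]
  rw [PySem.List.pyRange_one]
  rw [List.countP_map]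
  have hrange : ((num : Int) + 1 - 1).toNat = num.toNat := by omega
  rw [hrange]
  have hfun : ((fun i => decide (PySem.Int.mod num i = 0)) ∘ (fun k : ℕ => (1 : Int) + k))
      = fun k : ℕ => decide ((k + 1) ∣ num.toNat) := by
    funext k
    simp only [Function.comp_apply, decide_eq_decide]
    rw [PySem.Int.mod_eq_zero_iff_dvd]
    have hnum : ((num.toNat : ℕ) : Int) = num := Int.toNat_of_nonneg (by omega)
    have hdiv : (1 + (k : Int)) = ((k + 1 : ℕ) : Int) := by push_cast; ring
    rw [hdiv, ← hnum, Int.natCast_dvd_natCast, Int.toNat_natCast]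
  rw [hfun, countP_range_divisors _ (by omega)]
  simp

-- no perfect square strictly between (k-1)² and k²
theorem not_square_between (k n : Int) (hk : 1 ≤ k) (h1 : (k - 1) * (k - 1) < n)
    (h2 : n < k * k) : ¬ IsSquare n.toNat := by
  rintro ⟨r, hr⟩
  have hn0 : 0 ≤ n := le_trans (mul_self_nonneg (k - 1)) (le_of_lt h1)
  have hcast : ((r : Int)) * (r : Int) = n := by
    have : ((n.toNat : ℕ) : Int) = n := Int.toNat_of_nonneg hn0
    rw [← this, hr]
    push_cast
    ring
  by_cases h : ((r : Int)) ≤ k - 1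
  · have hr0 : (0 : Int) ≤ r := by positivity
    nlinarith
  · push Not at h
    nlinarith

-- the square num = k*k (k ≥ 1) is a perfect square of num.toNat
theorem square_toNat (k num : Int) (hk : 1 ≤ k) (h : num = k * k) : IsSquare num.toNat := by
  refine ⟨k.toNat, ?_⟩
  have hc : ((k.toNat * k.toNat : ℕ) : Int) = num := by
    push_cast
    rw [Int.toNat_of_nonneg (by omega)]
    rw [h]
  have h2 := congrArg Int.toNat hc
  rw [Int.toNat_natCast] at h2
  exact h2.symm

-- per-element: A's branch agrees with B's square test under the pointer invariant
theorem stepA_eq_stepB (ans num k : Int) (hk : 1 ≤ k) (hub : num ≤ k * k)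
    (hlb : (k - 1) * (k - 1) < num ∨ k = 1) :
    stepA ans num = (stepB (ans, k) num).1 := by
  unfold stepA stepB
  by_cases hsq : num = k * k
  · -- square: odd divisor count, A subtracts; B subtracts
    have hnum1 : 1 ≤ num := by nlinarith
    rw [innerFold_eq_card num hnum1]
    have hodd : Odd (num.toNat.divisors.card) :=
      (odd_card_divisors_iff _ (by omega)).mpr (square_toNat k num hk hsq)
    have hmod : ¬ PySem.Int.mod (num.toNat.divisors.card : Int) 2 = 0 := by
      rw [PySem.Int.mod_eq_zero_iff_dvd]
      intro hdvd
      have : (2 : ℕ) ∣ num.toNat.divisors.card := by exact_mod_cast hdvd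
      exact (Nat.not_even_iff_odd.mpr hodd) (even_iff_two_dvd.mpr this)
    rw [if_neg hmod]
    simp [hsq]
  · -- not the tracked square: even divisor count, A adds; B adds
    by_cases hle : num ≤ 0
    · -- empty inner range: tmp = 0
      have hnil : PySem.List.pyRange 1 (num + 1) 1 = [] :=
        PySem.List.pyRange_one_eq_nil (by omega)
      simp [hnil, hsq, PySem.Int.mod]
    · push Not at hle
      have hnum1 : 1 ≤ num := hle
      rw [innerFold_eq_card num hnum1]
      have hk1 : ¬ k = 1 := by
        intro h1
        subst h1
        have : num = 1 := by omega
        exact hsq (by omega)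
      have hlb' : (k - 1) * (k - 1) < num := by tauto
      have hnsq : ¬ IsSquare num.toNat :=
        not_square_between k num hk hlb' (lt_of_le_of_ne hub hsq)
      have heven : Even (num.toNat.divisors.card) :=
        Nat.not_odd_iff_even.mp (fun h => hnsq ((odd_card_divisors_iff _ (by omega)).mp h))
      have hmod : PySem.Int.mod (num.toNat.divisors.card : Int) 2 = 0 := by
        rw [PySem.Int.mod_eq_zero_iff_dvd]
        exact_mod_cast even_iff_two_dvd.mp heven
      rw [if_pos hmod]
      simp [hsq]

-- the pointer invariant: k is the least p ≥ 1 with num ≤ p*p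
def KInv (num k : Int) : Prop := 1 ≤ k ∧ num ≤ k * k ∧ ((k - 1) * (k - 1) < num ∨ k = 1)

theorem loop_eq (n : ℕ) : ∀ (num hi ans k : Int), (hi - num).toNat = n → KInv num k →
    (PySem.List.pyRange num hi 1).foldl stepA ans
      = ((PySem.List.pyRange num hi 1).foldl stepB (ans, k)).1 := by
  induction n with
  | zero =>
    intro num hi ans k hn _
    rw [PySem.List.pyRange_one_eq_nil (by omega)]
    simp
  | succ n ih =>
    intro num hi ans k hn hinv
    obtain ⟨hk, hub, hlb⟩ := hinv
    rw [PySem.List.pyRange_one_cons (by omega)]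
    simp only [List.foldl_cons]
    rw [stepA_eq_stepB ans num k hk hub hlb]
    by_cases hsq : num = k * k
    · have hB : stepB (ans, k) num = (ans - num, k + 1) := by simp [stepB, hsq]
      rw [hB]
      refine ih (num + 1) hi _ (k + 1) (by omega) ⟨by omega, by nlinarith, ?_⟩
      left
      have : (k + 1 - 1) * (k + 1 - 1) = k * k := by ring
      omega
    · have hB : stepB (ans, k) num = (ans + num, k) := by simp [stepB, hsq]
      rw [hB]
      refine ih (num + 1) hi _ k (by omega) ⟨hk, by omega, ?_⟩
      rcases hlb with h | h
      · left; omega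
      · right; exact h

-- Source B's initial while loop establishes the invariant at num = left
theorem findK_spec (left : Int) : ∀ (n : ℕ) (k : Int), (left - k).toNat = n → 1 ≤ k →
    ((k - 1) * (k - 1) < left ∨ k = 1) → KInv left (solutionAltFindK left k) := by
  intro n
  induction n with
  | zero =>
    intro k hn hk hlb
    have hstop : ¬ k * k < left := by
      intro h
      have hkk : k ≤ k * k := by nlinarith
      omega
    rw [solutionAltFindK, if_neg hstop]
    exact ⟨hk, by omega, hlb⟩
  | succ n ih =>
    intro k hn hk hlb
    rw [solutionAltFindK]
    by_cases h : k * k < left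
    · rw [if_pos h]
      have hkk : k ≤ k * k := by nlinarith
      refine ih (k + 1) (by omega) (by omega) ?_
      left
      have : (k + 1 - 1) * (k + 1 - 1) = k * k := by ring
      omega
    · rw [if_neg h]
      exact ⟨hk, by omega, hlb⟩

-- ===== VERDICT (by name: the statement is the Claim_ definition above) =====
theorem solution_spec : Claim_equal_solution := by
  intro left right _
  unfold Spec_solution
  rw [solution_eq_foldA, solution_alt_eq_foldB]
  have hinv : KInv left (solutionAltFindK left 1) :=
    findK_spec left (left - 1).toNat 1 rfl (by omega) (by right; rfl)
  exact loop_eq (right + 1 - left).toNat left (right + 1) 0 _ rfl hinv
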